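-- pv_equiv track=rewrite | github.com/h1nayoshi/smalien | hive/ovomorph/chestbuster/dataflowanalyzer/dataflowimpfinder.py | __get_const_type
-- ===== SOURCE A (Python) =====
-- def __get_const_type(start, end, states):
--   for i in range(start+1, end):
--     if (i in states.keys()):
--       for s in states[i]:
--         if (s['role'] == 'dest'):
--           return 'unknown'
--         if (s['type'] not in ['unknown', 'const']):
--           return s['type']
--   return 'unknown'
-- ===== SOURCE B (Python) =====
-- def __get_const_type(start, end, states):
--     # Single pass over the dict's own items, tracking the smallest qualifying
--     # index, instead of probing every integer in range(start+1, end).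
--     best_key = None
--     best_type = None
--     for k, entries in states.items():
--         if start < k < end and (best_key is None or k < best_key):
--             for s in entries:
--                 if s['role'] == 'dest':
--                     best_key, best_type = k, 'unknown'
--                     break
--                 if s['type'] not in ('unknown', 'const'):
--                     best_key, best_type = k, s['type']
--                     break
--     return best_type if best_key is not None else 'unknown'
-- ===== Notes on version B (the rewrite author's own statement) =====
-- stated objective: alternative
-- what changed: Instead of scanning every integer in range(start+1, end) and probing the dict, B makes one pass over the dict's own items, keeping the smallest in-range key whose state list yields a verdict; cost depends on the number of entries, not on the width of the range.
-- outside the precondition, e.g. on __get_const_type(0, 3, {2: [{}], 1: [{'role': 'dest'}]}): A returns 'unknown', B raises KeyError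
import Mathlib
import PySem

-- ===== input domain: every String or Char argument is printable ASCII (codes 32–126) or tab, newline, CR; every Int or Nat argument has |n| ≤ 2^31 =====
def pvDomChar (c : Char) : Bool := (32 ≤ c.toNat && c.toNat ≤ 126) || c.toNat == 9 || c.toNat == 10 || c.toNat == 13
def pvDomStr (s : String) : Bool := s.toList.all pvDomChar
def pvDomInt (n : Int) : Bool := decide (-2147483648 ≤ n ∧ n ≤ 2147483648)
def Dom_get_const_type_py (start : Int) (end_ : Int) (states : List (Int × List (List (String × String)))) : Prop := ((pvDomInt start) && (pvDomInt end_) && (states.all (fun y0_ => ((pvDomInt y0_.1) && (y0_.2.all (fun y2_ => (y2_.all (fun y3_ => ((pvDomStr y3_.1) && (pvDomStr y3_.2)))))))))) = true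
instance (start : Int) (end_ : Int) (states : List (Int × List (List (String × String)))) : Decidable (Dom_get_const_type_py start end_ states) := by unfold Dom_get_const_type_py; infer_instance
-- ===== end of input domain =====

-- B replaces A's dense scan of range(start+1, end) by a single pass over the dict's
-- own items keeping the smallest qualifying key (alternative algorithm, same results).

-- ===== PORT A =====
-- s['role'] / s['type']: dict lookup; a missing key is a Python KeyError, excluded
-- by Pre_, so the port totalizes it with getD "" (only reachable outside Pre_).
def pvField (s : List (String × String)) (k : String) : String :=
  ((PySem.Dict.mk s).get? k).getD ""

-- the inner 'for s in …' loop with its two early returns (shared verbatim by A and B)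
def pvScanState : List (List (String × String)) → Option String
  | [] => none
  | s :: rest =>
    if pvField s "role" = "dest" then some "unknown"
    else if ¬ (pvField s "type" = "unknown" ∨ pvField s "type" = "const") then some (pvField s "type")
    else pvScanState rest

-- A's outer loop: for i in range(start+1, end): if i in states.keys(): …
def pvLoopA (states : List (Int × List (List (String × String)))) : List Int → String
  | [] => "unknown"
  | i :: rest =>
    if (PySem.Dict.mk states).contains i then
      match pvScanState (((PySem.Dict.mk states).get? i).getD []) with
      | some r => r
      | none => pvLoopA states rest
    else pvLoopA states rest

def get_const_type_py (start : Int) (end_ : Int) (states : List (Int × List (List (String × String)))) : String :=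
  pvLoopA states (PySem.List.pyRange (start + 1) end_ 1)

-- ===== PORT B =====
-- one step of B's loop over states.items(): consider (k, entries) only when k is in
-- range and smaller than the best key so far
def pvStepB (start : Int) (end_ : Int) (best : Option (Int × String))
    (e : Int × List (List (String × String))) : Option (Int × String) :=
  if start < e.1 && e.1 < end_ && (match best with | none => true | some b => decide (e.1 < b.1)) then
    match pvScanState e.2 with
    | some t => some (e.1, t)
    | none => best
  else best

def get_const_type_py_alt (start : Int) (end_ : Int) (states : List (Int × List (List (String × String)))) : String :=
  match (PySem.Dict.mk states).items.foldl (pvStepB start end_) none with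
  | some (_, t) => t
  | none => "unknown"

-- ===== PRECONDITION & SPEC =====
-- Pre_ excludes (a) inputs where some state record of an in-range entry lacks a
-- 'role' or 'type' field — there A usually raises KeyError, and on the remainder A's
-- return is an accident of which entries its ascending scan reaches while B may probe
-- an entry A never reaches and raise — and (b) assoc lists with duplicate keys, which
-- cannot arise from a real Python dict.
def Pre_get_const_type_py (start : Int) (end_ : Int) (states : List (Int × List (List (String × String)))) : Prop :=
  (states.map Prod.fst).Nodup ∧
  ∀ e ∈ states, start < e.1 → e.1 < end_ → ∀ s ∈ e.2,
    (PySem.Dict.mk s).contains "role" = true ∧ (PySem.Dict.mk s).contains "type" = true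

instance (start : Int) (end_ : Int) (states : List (Int × List (List (String × String)))) : Decidable (Pre_get_const_type_py start end_ states) := by
  unfold Pre_get_const_type_py; infer_instance

def pvWitness_get_const_type_py : Int × Int × (List (Int × List (List (String × String)))) :=
  (0, 2, [(1, [[("role", "src"), ("type", "int")]])])

def Spec_get_const_type_py (start : Int) (end_ : Int) (states : List (Int × List (List (String × String)))) (out : String) : Prop := out = get_const_type_py_alt start end_ states
instance (start : Int) (end_ : Int) (states : List (Int × List (List (String × String)))) (out : String) : Decidable (Spec_get_const_type_py start end_ states out) := by unfold Spec_get_const_type_py; infer_instance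

-- ===== CLAIM (what is proved, stated in full; the proofs are below) =====
def Claim_equal_get_const_type_py : Prop := ∀ (start : Int) (end_ : Int) (states : List (Int × List (List (String × String)))), Dom_get_const_type_py start end_ states → Pre_get_const_type_py start end_ states → Spec_get_const_type_py start end_ states (get_const_type_py start end_ states)

-- ===== LEMMAS AND PROOFS =====

-- the verdict an index i of the range contributes, as seen by A
def pvG (states : List (Int × List (List (String × String)))) (i : Int) : Option String :=
  if (PySem.Dict.mk states).contains i then pvScanState (((PySem.Dict.mk states).get? i).getD []) else none

-- the qualifying (key, verdict) pair an entry contributes, as seen by B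
def pvQual (start end_ : Int) (e : Int × List (List (String × String))) : Option (Int × String) :=
  if start < e.1 ∧ e.1 < end_ then (pvScanState e.2).map (fun t => (e.1, t)) else none

-- keep the pair with the smaller key (first wins on ties)
def pvMin (b : Option (Int × String)) (p : Int × String) : Option (Int × String) :=
  match b with
  | none => some p
  | some q => if p.1 < q.1 then some p else b

theorem pvLoopA_eq_findSome (states : List (Int × List (List (String × String)))) :
    ∀ l : List Int, pvLoopA states l = (l.findSome? (pvG states)).getD "unknown" := by
  intro l
  induction l with
  | nil => rfl
  | cons i rest ih =>
    rw [List.findSome?_cons]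
    simp only [pvLoopA, pvG]
    by_cases h : (PySem.Dict.mk states).contains i = true
    · simp only [h, if_true]
      cases pvScanState (((PySem.Dict.mk states).get? i).getD []) <;> simp [ih]
    · simp [h, ih]

theorem pvStepB_eq_min (start end_ : Int) (b : Option (Int × String)) (e : Int × List (List (String × String))) :
    pvStepB start end_ b e = match pvQual start end_ e with
      | none => b
      | some p => pvMin b p := by
  unfold pvStepB pvQual pvMin
  by_cases hr : start < e.1 ∧ e.1 < end_
  · cases hs : pvScanState e.2 with
    | none => cases b <;> simp [hr.1, hr.2]
    | some t =>
      cases b with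
      | none => simp [hr.1, hr.2]
      | some q =>
        by_cases hlt : e.1 < q.1 <;> simp [hr.1, hr.2, hlt]
  · have h1 : (decide (start < e.1) && decide (e.1 < end_)) = false := by
      rcases not_and_or.mp hr with h | h <;> simp [h]
    cases b <;> simp [hr, h1]

theorem pvFoldB_eq_foldMin (start end_ : Int) :
    ∀ (l : List (Int × List (List (String × String)))) (b : Option (Int × String)),
      l.foldl (pvStepB start end_) b = (l.filterMap (pvQual start end_)).foldl pvMin b := by
  intro l
  induction l with
  | nil => intro b; rfl
  | cons e rest ih =>
    intro b
    simp only [List.foldl_cons, List.filterMap_cons, pvStepB_eq_min]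
    cases hq : pvQual start end_ e with
    | none => simpa using ih b
    | some p => simpa using ih (pvMin b p)

-- the min-fold starting from none returns none iff the list is empty
theorem pvFoldMin_some :
    ∀ (l : List (Int × String)) (p : Int × String), l.foldl pvMin (some p) ≠ none := by
  intro l
  induction l with
  | nil => intro p h; simp at h
  | cons q rest ih =>
    intro p
    simp only [List.foldl_cons]
    have hv : pvMin (some p) q = if q.1 < p.1 then some q else some p := rfl
    rw [hv]
    by_cases hlt : q.1 < p.1
    · rw [if_pos hlt]; exact ih q
    · rw [if_neg hlt]; exact ih p

theorem pvFoldMin_none_iff (l : List (Int × String)) :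
    l.foldl pvMin none = none ↔ l = [] := by
  cases l with
  | nil => simp
  | cons q rest =>
    simp only [List.foldl_cons]
    exact iff_of_false (pvFoldMin_some rest q) (by simp)

-- the result of the min-fold is an element of (b together with) the list,
-- with key ≤ every key of the list and ≤ b's key
theorem pvFoldMin_spec :
    ∀ (l : List (Int × String)) (b : Option (Int × String)) (p : Int × String),
      l.foldl pvMin b = some p →
      (p ∈ l ∨ b = some p) ∧ (∀ q ∈ l, p.1 ≤ q.1) ∧ (∀ q, b = some q → p.1 ≤ q.1) := by
  intro l
  induction l with
  | nil =>
    intro b p h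
    simp only [List.foldl_nil] at h
    subst h
    refine ⟨Or.inr rfl, by simp, ?_⟩
    intro q hq
    injection hq with h'
    rw [h']
  | cons r rest ih =>
    intro b p h
    simp only [List.foldl_cons] at h
    obtain ⟨hmem, hle, hb⟩ := ih (pvMin b r) p h
    have key : (pvMin b r = some r ∧ ∀ q, b = some q → r.1 ≤ q.1) ∨
               (pvMin b r = b ∧ ∃ b0, b = some b0 ∧ b0.1 ≤ r.1) := by
      cases b with
      | none => exact Or.inl ⟨rfl, fun q hq => nomatch hq⟩
      | some b0 =>
        by_cases hlt : r.1 < b0.1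
        · refine Or.inl ⟨by simp [pvMin, hlt], ?_⟩
          intro q hq; injection hq with h'; subst h'; omega
        · exact Or.inr ⟨by simp [pvMin, hlt], b0, rfl, by omega⟩
    rcases key with ⟨hv, hrle⟩ | ⟨hv, b0, hb0, hble⟩
    · rw [hv] at hmem hb
      have hpr : p.1 ≤ r.1 := hb r rfl
      refine ⟨?_, ?_, ?_⟩
      · rcases hmem with h1 | h1
        · exact Or.inl (List.mem_cons_of_mem _ h1)
        · injection h1 with h1'
          subst h1'
          exact Or.inl List.mem_cons_self
      · intro q hq
        rcases List.mem_cons.mp hq with rfl | hq'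
        · exact hpr
        · exact hle q hq'
      · intro q hq
        exact le_trans hpr (hrle q hq)
    · rw [hv] at hmem hb
      have hpb : p.1 ≤ b0.1 := hb b0 hb0
      refine ⟨?_, ?_, ?_⟩
      · rcases hmem with h1 | h1
        · exact Or.inl (List.mem_cons_of_mem _ h1)
        · exact Or.inr h1
      · intro q hq
        rcases List.mem_cons.mp hq with rfl | hq'
        · omega
        · exact hle q hq'
      · intro q hq
        rw [hb0] at hq
        injection hq with h'
        subst h'
        exact hpb

-- membership characterization: (k, t) is a qualifying pair of states  ↔  g k = some t,
-- for k in range (needs Nodup keys)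
theorem pvQual_mem_iff (start end_ : Int) (states : List (Int × List (List (String × String))))
    (hnd : (states.map Prod.fst).Nodup) (k : Int) (t : String) :
    (k, t) ∈ states.filterMap (pvQual start end_) ↔
      (start < k ∧ k < end_ ∧ pvG states k = some t) := by
  rw [List.mem_filterMap]
  constructor
  · rintro ⟨e, he, hq⟩
    unfold pvQual at hq
    by_cases hr : start < e.1 ∧ e.1 < end_
    · rw [if_pos hr] at hq
      rcases Option.map_eq_some_iff.mp hq with ⟨t', hs, heq⟩
      have heq' : (e.1, t') = (k, t) := heq
      have hk : e.1 = k := (Prod.mk.injEq _ _ _ _ ▸ heq').1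
      have ht : t' = t := (Prod.mk.injEq _ _ _ _ ▸ heq').2
      subst hk; subst ht
      refine ⟨hr.1, hr.2, ?_⟩
      unfold pvG
      have hget : (PySem.Dict.mk states).get? e.1 = some e.2 := by
        apply PySem.Dict.get?_of_mem_items
        · exact he
        · simpa [PySem.Dict.keys] using hnd
      have hcont : (PySem.Dict.mk states).contains e.1 = true := by
        rw [PySem.Dict.contains_eq_isSome_get?, hget]; rfl
      rw [if_pos hcont, hget]
      simpa using hs
    · rw [if_neg hr] at hq
      exact absurd hq (by simp)
  · rintro ⟨h1, h2, hg⟩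
    unfold pvG at hg
    by_cases hcont : (PySem.Dict.mk states).contains k
    · rw [if_pos hcont] at hg
      have hsome : ((PySem.Dict.mk states).get? k).isSome := by
        rw [← PySem.Dict.contains_eq_isSome_get?]; exact hcont
      rcases Option.isSome_iff_exists.mp hsome with ⟨v, hv⟩
      have hmem : (k, v) ∈ (PySem.Dict.mk states).items :=
        PySem.Dict.mem_items_of_get?_eq_some (PySem.Dict.mk states) hv
      refine ⟨(k, v), hmem, ?_⟩
      unfold pvQual
      rw [hv] at hg
      simp only [if_pos (And.intro h1 h2)]
      simp only [Option.getD_some] at hg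
      rw [hg]
      rfl
    · rw [if_neg hcont] at hg
      exact absurd hg (by simp)

-- a findSome? over a strictly sorted list hits the minimal index with a verdict
theorem pvFindSome_of_min (g : Int → Option String) (k₀ : Int) (t₀ : String) :
    ∀ (l : List Int), l.Pairwise (· < ·) → k₀ ∈ l → g k₀ = some t₀ →
      (∀ k ∈ l, k < k₀ → g k = none) → l.findSome? g = some t₀ := by
  intro l
  induction l with
  | nil => intro _ h; simp at h
  | cons a rest ih =>
    intro hp hmem hg hnone
    rcases List.mem_cons.mp hmem with rfl | hmem'
    · simp [hg]
    · have ha : a < k₀ := (List.pairwise_cons.mp hp).1 k₀ hmem'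
      have hga : g a = none := hnone a (List.mem_cons_self) ha
      simp only [List.findSome?_cons, hga]
      exact ih (List.pairwise_cons.mp hp).2 hmem' hg
        (fun k hk hlt => hnone k (List.mem_cons_of_mem _ hk) hlt)

-- ===== VERDICT (by name: the statement is the Claim_ definition above) =====
theorem get_const_type_py_spec : Claim_equal_get_const_type_py := by
  intro start end_ states _hdom hpre
  rcases hpre with ⟨hnd, _⟩
  unfold Spec_get_const_type_py get_const_type_py get_const_type_py_alt
  rw [pvLoopA_eq_findSome]
  have hitems : (PySem.Dict.mk states).items = states := rfl
  rw [hitems, pvFoldB_eq_foldMin]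
  cases hfold : (states.filterMap (pvQual start end_)).foldl pvMin none with
  | none =>
    -- no qualifying pair: every index of the range yields none
    have hQnil : states.filterMap (pvQual start end_) = [] :=
      (pvFoldMin_none_iff _).mp hfold
    have hall : ∀ k ∈ PySem.List.pyRange (start + 1) end_ 1, pvG states k = none := by
      intro k hk
      rcases PySem.List.mem_pyRange_one.mp hk with ⟨hk1, hk2⟩
      cases hg : pvG states k with
      | none => rfl
      | some t =>
        have hin : (k, t) ∈ states.filterMap (pvQual start end_) :=
          (pvQual_mem_iff start end_ states hnd k t).mpr ⟨by omega, hk2, hg⟩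
        rw [hQnil] at hin
        exact absurd hin (by simp)
    rw [List.findSome?_eq_none_iff.mpr hall]
    rfl
  | some p =>
    obtain ⟨k0, t0⟩ := p
    rcases pvFoldMin_spec _ none (k0, t0) hfold with ⟨hmem, hle, _⟩
    have hmemQ : (k0, t0) ∈ states.filterMap (pvQual start end_) := by
      rcases hmem with h | h
      · exact h
      · exact nomatch h
    rcases (pvQual_mem_iff start end_ states hnd k0 t0).mp hmemQ with ⟨h1, h2, hg⟩
    have hfind : (PySem.List.pyRange (start + 1) end_ 1).findSome? (pvG states) = some t0 := by
      apply pvFindSome_of_min (pvG states) k0 t0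
      · exact PySem.List.pairwise_lt_pyRange_one _ _
      · exact PySem.List.mem_pyRange_one.mpr ⟨by omega, h2⟩
      · exact hg
      · intro k hk hlt
        rcases PySem.List.mem_pyRange_one.mp hk with ⟨hk1, hk2⟩
        cases hgk : pvG states k with
        | none => rfl
        | some t =>
          have hin : (k, t) ∈ states.filterMap (pvQual start end_) :=
            (pvQual_mem_iff start end_ states hnd k t).mpr ⟨by omega, hk2, hgk⟩
          have := hle _ hin
          simp only at this
          omega
    rw [hfind]
    rfl
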